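-- pv_equiv track=rewrite | github.com/xuezhou1998/my442project | xuw86hw2F.py | is_done_distinct
-- ===== SOURCE A (Python) =====
-- def is_done_distinct(Disk):
--     counter=0
--     for i in reversed(Disk):
--         if i!=-1:
--             counter+=1
--         else:
--             break
--
--     if counter==len(Disk)-Disk.count(-1):
--         return True
--     else:
--         return False
-- ===== SOURCE B (Python) =====
-- def is_done_distinct(Disk):
--     seen = False
--     for x in Disk:
--         if x != -1:
--             seen = True
--         elif seen:
--             return False
--     return True
-- ===== Notes on version B (the rewrite author's own statement) =====
-- stated objective: simpler
-- what changed: Replaces the two-pass reversed counting loop plus count(-1) arithmetic with a single forward pass keeping a boolean 'seen a non-(-1)' flag that returns False as soon as a -1 follows a non-(-1).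
import Mathlib
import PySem

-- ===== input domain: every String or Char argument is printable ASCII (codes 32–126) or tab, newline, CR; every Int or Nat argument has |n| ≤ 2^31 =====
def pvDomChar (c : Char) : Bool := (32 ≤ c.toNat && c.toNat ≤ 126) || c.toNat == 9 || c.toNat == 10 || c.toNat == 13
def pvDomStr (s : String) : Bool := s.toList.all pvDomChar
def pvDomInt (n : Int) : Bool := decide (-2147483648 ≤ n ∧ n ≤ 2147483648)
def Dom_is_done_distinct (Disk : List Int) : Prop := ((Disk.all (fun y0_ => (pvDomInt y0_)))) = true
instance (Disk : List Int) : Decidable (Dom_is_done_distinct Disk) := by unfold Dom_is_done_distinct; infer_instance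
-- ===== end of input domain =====

-- B replaces A's reversed counting loop + count(-1) comparison by a single forward pass with a 'seen' flag (simpler).

-- ===== PORT A =====
-- 'counter=0; for i in reversed(Disk): if i!=-1: counter+=1 else: break' — recursion over Disk.reverse, stopping at the first -1
def pvCountLoop : List Int → Int → Int
  | [], counter => counter
  | i :: rest, counter => if i ≠ -1 then pvCountLoop rest (counter + 1) else counter

def is_done_distinct (Disk : List Int) : Bool :=
  let counter := pvCountLoop Disk.reverse 0
  if counter = (Disk.length : Int) - PySem.List.count Disk (-1) then true else false

-- ===== PORT B =====
def pvFlagLoop : Bool → List Int → Bool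
  | _, [] => true
  | seen, x :: rest => if x ≠ -1 then pvFlagLoop true rest
                       else if seen then false else pvFlagLoop seen rest

def is_done_distinct_alt (Disk : List Int) : Bool := pvFlagLoop false Disk

-- ===== PRECONDITION & SPEC =====
def Spec_is_done_distinct (Disk : List Int) (out : Bool) : Prop := out = is_done_distinct_alt Disk
instance (Disk : List Int) (out : Bool) : Decidable (Spec_is_done_distinct Disk out) := by unfold Spec_is_done_distinct; infer_instance

-- ===== CLAIM (what is proved, stated in full; the proofs are below) =====
def Claim_equal_is_done_distinct : Prop := ∀ (Disk : List Int), Dom_is_done_distinct Disk → Spec_is_done_distinct Disk (is_done_distinct Disk)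

-- ===== LEMMAS AND PROOFS =====

theorem pvCountLoop_acc (l : List Int) (c : Int) :
    pvCountLoop l c = c + pvCountLoop l 0 := by
  induction l generalizing c with
  | nil => simp [pvCountLoop]
  | cons x xs ih =>
    by_cases hx : x = -1 <;> simp [pvCountLoop, hx]
    rw [ih (c + 1), ih 1]; ring

theorem pvCountLoop_append_all (l t : List Int) (h : ∀ x ∈ l, x ≠ -1) :
    pvCountLoop (l ++ t) 0 = (l.length : Int) + pvCountLoop t 0 := by
  induction l with
  | nil => simp
  | cons x xs ih =>
    simp only [List.cons_append, pvCountLoop, if_pos (h x (by simp))]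
    rw [pvCountLoop_acc, ih (fun y hy => h y (by simp [hy]))]
    simp only [List.length_cons]
    push_cast
    ring

theorem pvCountLoop_all (l : List Int) (h : ∀ x ∈ l, x ≠ -1) :
    pvCountLoop l 0 = (l.length : Int) := by
  have := pvCountLoop_append_all l [] h
  simpa [pvCountLoop] using this

theorem pvCountLoop_append_not_all (l t : List Int) (h : ∃ x ∈ l, x = -1) :
    pvCountLoop (l ++ t) 0 = pvCountLoop l 0 := by
  induction l with
  | nil => simp at h
  | cons x xs ih =>
    by_cases hx : x = -1
    · simp [pvCountLoop, hx]
    · obtain ⟨y, hy, hy1⟩ := h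
      rcases List.mem_cons.mp hy with hy | hy
      · exact absurd hy1 (hy ▸ hx)
      · simp only [List.cons_append, pvCountLoop, if_pos hx]
        rw [pvCountLoop_acc, ih ⟨y, hy, hy1⟩, pvCountLoop_acc xs (0 + 1)]

theorem pvCountLoop_append_single (l : List Int) :
    pvCountLoop (l ++ [-1]) 0 = pvCountLoop l 0 := by
  by_cases h : ∀ x ∈ l, x ≠ -1
  · rw [pvCountLoop_append_all l _ h, pvCountLoop_all l h]
    simp [pvCountLoop]
  · push_neg at h
    exact pvCountLoop_append_not_all l _ (by simpa using h)

theorem pvCountLoop_le (l : List Int) :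
    pvCountLoop l 0 ≤ (l.countP (fun x => x ≠ -1) : Int) := by
  induction l with
  | nil => simp [pvCountLoop]
  | cons x xs ih =>
    by_cases hx : x = -1
    · subst hx
      have h0 : pvCountLoop (-1 :: xs) 0 = 0 := by simp [pvCountLoop]
      rw [h0]
      positivity
    · have h1 : pvCountLoop (x :: xs) 0 = pvCountLoop xs 0 + 1 := by
        simp only [pvCountLoop, if_pos hx]
        rw [pvCountLoop_acc]
        ring
      rw [h1, List.countP_cons, if_pos (show (decide (x ≠ -1)) = true by simpa using hx)]
      push_cast
      omega

theorem pvFlagLoop_true (l : List Int) :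
    pvFlagLoop true l = l.all (fun x => x != -1) := by
  induction l with
  | nil => rfl
  | cons x xs ih => by_cases hx : x = -1 <;> simp [pvFlagLoop, hx, ih]

theorem count_split (xs : List Int) :
    (xs.length : Int) - (xs.count (-1) : Int) = (xs.countP (fun y => y ≠ -1) : Int) := by
  have h1 : xs.countP (fun y => decide (y ≠ -1)) + xs.countP (fun y => ¬ decide (y ≠ -1)) = xs.length :=
    (List.length_eq_countP_add_countP (p := fun y => decide (y ≠ -1)) (l := xs)).symm
  have hc : xs.countP (fun y => ¬ decide (y ≠ -1)) = xs.count (-1) := by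
    rw [List.count]; apply List.countP_congr; intro a _
    by_cases ha : a = -1 <;> simp [ha]
  omega

-- main characterisation: A's counter condition ↔ B's flag loop
theorem main_iff (l : List Int) :
    pvFlagLoop false l =
      decide (pvCountLoop l.reverse 0 = (l.length : Int) - (l.count (-1) : Int)) := by
  induction l with
  | nil => simp [pvFlagLoop, pvCountLoop]
  | cons x xs ih =>
    by_cases hx : x = -1
    · -- both sides reduce to the xs case
      have hB : pvFlagLoop false (x :: xs) = pvFlagLoop false xs := by
        simp [pvFlagLoop, hx]
      have hA : pvCountLoop (x :: xs).reverse 0 = pvCountLoop xs.reverse 0 := by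
        rw [List.reverse_cons, hx]
        exact pvCountLoop_append_single xs.reverse
      rw [hB, hA, ih]
      have hcc : ((x :: xs).length : Int) - ((x :: xs).count (-1) : Int)
           = (xs.length : Int) - (xs.count (-1) : Int) := by
        subst hx
        simp [List.count_cons]
        try push_cast
        try ring
      rw [hcc]
    · -- x ≠ -1 : B = xs.all (· ≠ -1)
      have hB : pvFlagLoop false (x :: xs) = pvFlagLoop true xs := by
        simp [pvFlagLoop, hx]
      rw [hB, pvFlagLoop_true]
      have hcnt : ((x :: xs).length : Int) - ((x :: xs).count (-1) : Int)
          = (xs.length : Int) + 1 - (xs.count (-1) : Int) := by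
        simp [List.count_cons, hx]
      by_cases hall : ∀ y ∈ xs, y ≠ -1
      · have hA : pvCountLoop (x :: xs).reverse 0 = (xs.length : Int) + 1 := by
          rw [List.reverse_cons,
              pvCountLoop_append_all _ _ (by intro y hy; exact hall y (by simpa using hy))]
          simp [pvCountLoop, hx]
        have hc0 : xs.count (-1) = 0 := by
          simp only [List.count_eq_zero]
          intro hmem; exact hall _ hmem rfl
        have hLall : xs.all (fun y => y != -1) = true := by
          simp only [List.all_eq_true]
          intro a ha; simpa using hall a ha
        rw [hA, hLall, hcnt, hc0]
        simp
      · push_neg at hall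
        obtain ⟨y, hy, hy1⟩ := hall
        have hA : pvCountLoop (x :: xs).reverse 0 = pvCountLoop xs.reverse 0 := by
          rw [List.reverse_cons]
          exact pvCountLoop_append_not_all _ _ ⟨y, by simpa using hy, hy1⟩
        have hle : pvCountLoop xs.reverse 0 ≤ (xs.countP (fun z => z ≠ -1) : Int) := by
          have := pvCountLoop_le xs.reverse
          simpa [List.countP_reverse] using this
        have hlt : (xs.countP (fun z => z ≠ -1) : Int) < (xs.length : Int) + 1 - (xs.count (-1) : Int) := by
          have := count_split xs
          omega
        have hLall : xs.all (fun z => z != -1) = false := by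
          simp only [List.all_eq_false]
          exact ⟨y, hy, by simpa using hy1⟩
        rw [hA, hLall, hcnt]
        symm
        simp only [decide_eq_false_iff_not]
        omega

-- ===== VERDICT (by name: the statement is the Claim_ definition above) =====
theorem is_done_distinct_spec : Claim_equal_is_done_distinct := by
  intro Disk _
  unfold Spec_is_done_distinct is_done_distinct is_done_distinct_alt
  rw [main_iff, PySem.List.count_eq]
  by_cases h : pvCountLoop Disk.reverse 0 = (Disk.length : Int) - (Disk.count (-1) : Int) <;>
    simp [h]
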